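-- pv_equiv track=rewrite | github.com/SecretaryKevin/Teaching | Assignment/installs_by_state.py | installs_by_state
-- ===== SOURCE A (Python) =====
-- def installs_by_state(solar_data):
--     final_dict = {}
--     for data in solar_data:
--         if data[-1] in final_dict:
--             final_dict[data[-1]] = final_dict[data[-1]] + data[2]
--         else:
--             final_dict[data[-1]] = data[2]
--     return final_dict
-- ===== SOURCE B (Python) =====
-- def installs_by_state(solar_data):
--     states = list(dict.fromkeys(data[-1] for data in solar_data))
--     return {s: sum(data[2] for data in solar_data if data[-1] == s) for s in states}
-- ===== Notes on version B (the rewrite author's own statement) =====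
-- stated objective: alternative
-- what changed: Replaces the single accumulating-dict pass with a collect-distinct-states-then-sum-per-state decomposition: dedup the state column once, then one comprehension summing installs per state.
import Mathlib
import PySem

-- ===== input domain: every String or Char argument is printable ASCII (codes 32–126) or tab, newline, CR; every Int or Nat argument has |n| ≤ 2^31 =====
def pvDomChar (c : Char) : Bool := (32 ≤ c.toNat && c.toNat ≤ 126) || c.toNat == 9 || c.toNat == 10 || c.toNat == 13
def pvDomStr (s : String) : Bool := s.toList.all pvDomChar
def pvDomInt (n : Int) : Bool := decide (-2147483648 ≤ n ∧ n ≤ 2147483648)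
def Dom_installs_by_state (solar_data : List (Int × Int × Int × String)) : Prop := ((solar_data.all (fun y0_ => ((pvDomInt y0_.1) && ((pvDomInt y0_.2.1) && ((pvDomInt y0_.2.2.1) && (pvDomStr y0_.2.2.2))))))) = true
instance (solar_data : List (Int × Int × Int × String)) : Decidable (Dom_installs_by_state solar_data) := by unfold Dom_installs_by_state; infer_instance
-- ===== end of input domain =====

-- B replaces A's single accumulating-dict pass by collecting the distinct states first
-- and summing installs per state (alternative decomposition, same return value).


-- ===== PORT A =====
-- loop body: data[-1] is the tuple's last component, data[2] its third
def installs_by_state (solar_data : List (Int × Int × Int × String)) : List (String × Int) :=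
  (solar_data.foldl
    (fun final_dict data =>
      if final_dict.contains data.2.2.2 then
        final_dict.insert data.2.2.2 (final_dict.getD data.2.2.2 0 + data.2.2.1)
      else
        final_dict.insert data.2.2.2 data.2.2.1)
    (PySem.Dict.empty : PySem.Dict String Int)).items

-- ===== PORT B =====
def installs_by_state_alt (solar_data : List (Int × Int × Int × String)) : List (String × Int) :=
  (PySem.List.dedup (solar_data.map (fun data => data.2.2.2))).map
    (fun s => (s, ((solar_data.filter (fun data => data.2.2.2 == s)).map (fun data => data.2.2.1)).sum))

-- ===== PRECONDITION & SPEC =====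
def Spec_installs_by_state (solar_data : List (Int × Int × Int × String)) (out : List (String × Int)) : Prop := out = installs_by_state_alt solar_data
instance (solar_data : List (Int × Int × Int × String)) (out : List (String × Int)) : Decidable (Spec_installs_by_state solar_data out) := by unfold Spec_installs_by_state; infer_instance

-- ===== CLAIM (what is proved, stated in full; the proofs are below) =====
def Claim_equal_installs_by_state : Prop := ∀ (solar_data : List (Int × Int × Int × String)), Dom_installs_by_state solar_data → Spec_installs_by_state solar_data (installs_by_state solar_data)

-- ===== LEMMAS AND PROOFS =====

-- A's loop step, with the branch pushed inside the inserted value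
theorem step_eq (d : PySem.Dict String Int) (data : Int × Int × Int × String) :
    (if d.contains data.2.2.2 then
        d.insert data.2.2.2 (d.getD data.2.2.2 0 + data.2.2.1)
      else
        d.insert data.2.2.2 data.2.2.1)
    = d.insert data.2.2.2 (if d.contains data.2.2.2 then d.getD data.2.2.2 0 + data.2.2.1 else data.2.2.1) := by
  by_cases h : d.contains data.2.2.2 <;> simp [h]

-- the value A's fold accumulates at key k: the start value plus the sum of installs at k
theorem getD_fold (l : List (Int × Int × Int × String)) (d : PySem.Dict String Int) (k : String) :
    ((l.foldl
      (fun final_dict data =>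
        if final_dict.contains data.2.2.2 then
          final_dict.insert data.2.2.2 (final_dict.getD data.2.2.2 0 + data.2.2.1)
        else
          final_dict.insert data.2.2.2 data.2.2.1) d).getD k 0)
    = d.getD k 0 + ((l.filter (fun data => data.2.2.2 == k)).map (fun data => data.2.2.1)).sum := by
  induction l generalizing d with
  | nil => simp
  | cons x l ih =>
    simp only [List.foldl_cons, ih, List.filter_cons]
    by_cases hk : x.2.2.2 = k
    · subst hk
      by_cases hc : d.contains x.2.2.2
      · simp [hc, PySem.Dict.getD_insert_self]; ring
      · have hc' : d.contains x.2.2.2 = false := by simpa using hc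
        simp [hc', PySem.Dict.getD_insert_self, PySem.Dict.getD_of_not_contains _ _ hc']
    · have : (x.2.2.2 == k) = false := by simp [hk]
      by_cases hc : d.contains x.2.2.2 <;>
        simp [hc, this, PySem.Dict.getD_insert, Ne.symm hk]

theorem fold_keys (l : List (Int × Int × Int × String)) :
    ((l.foldl
      (fun final_dict data =>
        if final_dict.contains data.2.2.2 then
          final_dict.insert data.2.2.2 (final_dict.getD data.2.2.2 0 + data.2.2.1)
        else
          final_dict.insert data.2.2.2 data.2.2.1)
      (PySem.Dict.empty : PySem.Dict String Int)).keys)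
    = PySem.Set.ofList (l.map (fun data => data.2.2.2)) := by
  have h := PySem.Dict.keys_foldl_insert_key (l := l) (key := fun data => data.2.2.2)
    (f := fun d data => if d.contains data.2.2.2 then d.getD data.2.2.2 0 + data.2.2.1 else data.2.2.1)
    (d := (PySem.Dict.empty : PySem.Dict String Int))
  simpa [step_eq, PySem.Set.update_empty, PySem.Dict.keys_empty] using h

theorem fold_keys_nodup (l : List (Int × Int × Int × String)) :
    ((l.foldl
      (fun final_dict data =>
        if final_dict.contains data.2.2.2 then
          final_dict.insert data.2.2.2 (final_dict.getD data.2.2.2 0 + data.2.2.1)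
        else
          final_dict.insert data.2.2.2 data.2.2.1)
      (PySem.Dict.empty : PySem.Dict String Int)).keys).Nodup := by
  rw [fold_keys]; exact PySem.Set.nodup_ofList _

-- ===== VERDICT (by name: the statement is the Claim_ definition above) =====
theorem installs_by_state_spec : Claim_equal_installs_by_state := by
  intro solar_data _
  unfold Spec_installs_by_state installs_by_state installs_by_state_alt
  rw [PySem.Dict.items_eq_map_keys _ (fold_keys_nodup solar_data) 0, fold_keys]
  simp [getD_fold, PySem.List.dedup_eq_ofList]
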